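-- pv_equiv track=rewrite | github.com/Krakoer/projet_bioinfo | algorithms/json_treatment.py | fix_par
-- ===== SOURCE A (Python) =====
-- def fix_par(s):
--     pstack = []
--     fixed = [c for c in s]
--
--     for i, c in enumerate(s):
--         if c == '(':
--             pstack.append(i)
--         elif c == ')':
--             if len(pstack) == 0:
--                 fixed[i] = '.'
--             else:
--                 pstack.pop()
--
--     while len(pstack) > 0:
--         fixed[pstack.pop()] = '.'
--
--     return ''.join(fixed)
-- ===== SOURCE B (Python) =====
-- def fix_par(s):
--     # pass 1, left-to-right: an open-paren counter; unmatched ')' become '.'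
--     out = []
--     opened = 0
--     for c in s:
--         if c == '(':
--             opened += 1
--             out.append(c)
--         elif c == ')':
--             if opened > 0:
--                 opened -= 1
--                 out.append(c)
--             else:
--                 out.append('.')
--         else:
--             out.append(c)
--     # pass 2, right-to-left: a close-paren counter; unmatched '(' become '.'
--     res = []
--     close = 0
--     for c in reversed(out):
--         if c == ')':
--             close += 1
--             res.append(c)
--         elif c == '(':
--             if close > 0:
--                 close -= 1
--                 res.append(c)
--             else:
--                 res.append('.')
--         else:
--             res.append(c)
--     res.reverse()
--     return ''.join(res)
-- ===== Notes on version B (the rewrite author's own statement) =====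
-- stated objective: alternative
-- what changed: Replaces the index stack plus final index-patching loop by two oppositely-directed counter passes: left-to-right with an open counter dotting unmatched closing parens, then right-to-left with a close counter dotting unmatched opening parens.
import Mathlib
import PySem

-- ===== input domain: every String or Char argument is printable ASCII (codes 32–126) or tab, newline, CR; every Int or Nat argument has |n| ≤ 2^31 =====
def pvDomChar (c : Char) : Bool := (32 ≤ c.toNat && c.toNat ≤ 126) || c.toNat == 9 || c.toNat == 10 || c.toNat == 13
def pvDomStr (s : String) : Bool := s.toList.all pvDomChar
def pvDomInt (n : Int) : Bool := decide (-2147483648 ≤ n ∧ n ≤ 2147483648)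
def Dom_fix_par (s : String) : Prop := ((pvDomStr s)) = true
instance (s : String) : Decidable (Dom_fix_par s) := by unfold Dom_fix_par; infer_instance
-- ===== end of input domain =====

-- B replaces A's stack of indices (plus a final index-patching loop) by two
-- oppositely-directed counter passes; same O(n) cost, different decomposition.

-- ===== PORT A =====
-- A's enumerate loop: state = (pstack of indices, fixed list); push/pop at the head
-- models Python's append/pop at the end of the stack (same LIFO order).
def goA : List Char → Nat → List Nat → List Char → List Nat × List Char
  | [], _, st, fixed => (st, fixed)
  | c :: r, i, st, fixed =>
    if c = '(' then goA r (i + 1) (i :: st) fixed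
    else if c = ')' then
      match st with
      | [] => goA r (i + 1) [] (fixed.set i '.')
      | _ :: rest => goA r (i + 1) rest fixed
    else goA r (i + 1) st fixed

def fix_par (s : String) : String :=
  let l := s.toList
  let p := goA l 0 [] l
  -- the final while loop: pop each remaining index and dot it
  String.ofList (p.1.foldl (fun f q => f.set q '.') p.2)

-- ===== PORT B =====
-- pass 1 of Source B: left-to-right, open counter, unmatched ')' become '.'
def fwd1 : List Char → Nat → List Char
  | [], _ => []
  | c :: r, op =>
    if c = '(' then c :: fwd1 r (op + 1)
    else if c = ')' then
      if op > 0 then c :: fwd1 r (op - 1) else '.' :: fwd1 r op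
    else c :: fwd1 r op

-- pass 2 of Source B: the loop over reversed(out) with close counter, rendered as a
-- right-to-left structural recursion (rightmost char is processed first; the
-- second component is the close counter after the processed suffix).
def bwd : List Char → Nat → List Char × Nat
  | [], k => ([], k)
  | c :: r, k =>
    let p := bwd r k
    if c = ')' then (c :: p.1, p.2 + 1)
    else if c = '(' then
      if p.2 > 0 then (c :: p.1, p.2 - 1) else ('.' :: p.1, p.2)
    else (c :: p.1, p.2)

def fix_par_alt (s : String) : String :=
  let out := fwd1 s.toList 0
  String.ofList (bwd out 0).1

-- ===== PRECONDITION & SPEC =====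
def Spec_fix_par (s : String) (out : String) : Prop := out = fix_par_alt s
instance (s : String) (out : String) : Decidable (Spec_fix_par s out) := by unfold Spec_fix_par; infer_instance

-- ===== CLAIM (what is proved, stated in full; the proofs are below) =====
def Claim_equal_fix_par : Prop := ∀ (s : String), Dom_fix_par s → Spec_fix_par s (fix_par s)

-- ===== LEMMAS AND PROOFS =====

def dotAll (st : List Nat) (f : List Char) : List Char :=
  st.foldl (fun f q => f.set q '.') f

theorem dotAll_append (st : List Nat) (u v : List Char)
    (h : ∀ q ∈ st, q < u.length) :
    dotAll st (u ++ v) = dotAll st u ++ v := by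
  induction st generalizing u with
  | nil => rfl
  | cons q st ih =>
    have hq : q < u.length := h q (by simp)
    simp only [dotAll, List.foldl]
    rw [show (u ++ v).set q '.' = u.set q '.' ++ v from by
      rw [List.set_append]; simp [hq]]
    exact ih (u.set q '.') (by intro p hp; simpa using h p (by simp [hp]))

theorem bwd_append (u v : List Char) (k : Nat) :
    bwd (u ++ v) k = ((bwd u (bwd v k).2).1 ++ (bwd v k).1, (bwd u (bwd v k).2).2) := by
  induction u with
  | nil => simp [bwd]
  | cons a u ih =>
    simp only [List.cons_append, bwd, ih]
    by_cases h1 : a = ')' <;> by_cases h2 : a = '(' <;> simp [h1, h2] <;> (try split) <;> simp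

theorem set_snoc (u : List Char) (a b : Char) (v : List Char) :
    (u ++ a :: v).set u.length b = u ++ b :: v := by
  rw [List.set_append]; simp

-- the main invariant: processing the remaining suffix l after an already-dotted
-- prefix p' whose stack is st, A's forward output equals p' ++ B's forward output,
-- and for every incoming close count c ≤ |stack|, the backward pass over the
-- dotted prefix cancels the c topmost stack parens, dots the rest, and exits 0.
theorem main_inv (l : List Char) : ∀ (p' : List Char) (st : List Nat),
    (∀ q ∈ st, q < p'.length) →
    (∀ c ≤ st.length, bwd p' c = (dotAll (st.drop c) p', 0)) →
    (goA l p'.length st (p' ++ l)).2 = p' ++ fwd1 l st.length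
    ∧ (∀ q ∈ (goA l p'.length st (p' ++ l)).1, q < p'.length + l.length)
    ∧ (∀ c ≤ (goA l p'.length st (p' ++ l)).1.length,
        bwd (p' ++ fwd1 l st.length) c
          = (dotAll ((goA l p'.length st (p' ++ l)).1.drop c) (p' ++ fwd1 l st.length), 0)) := by
  induction l with
  | nil =>
    intro p' st hb hinv
    refine ⟨by simp [goA, fwd1], by intro q hq; simpa using hb q (by simpa [goA] using hq), ?_⟩
    intro c hc
    simpa [goA, fwd1] using hinv c (by simpa [goA] using hc)
  | cons ch r ih =>
    intro p' st hb hinv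
    by_cases h1 : ch = '('
    · -- push: new prefix p' ++ ['('], new stack p'.length :: st
      subst h1
      have hgo : goA ('(' :: r) p'.length st (p' ++ '(' :: r)
          = goA r (p' ++ ['(']).length (p'.length :: st) ((p' ++ ['(']) ++ r) := by
        simp [goA]
      have hb' : ∀ q ∈ p'.length :: st, q < (p' ++ ['(']).length := by
        intro q hq
        rcases List.mem_cons.mp hq with rfl | hq
        · simp
        · have := hb q hq; simp; omega
      have hinv' : ∀ c ≤ (p'.length :: st).length,
          bwd (p' ++ ['(']) c = (dotAll ((p'.length :: st).drop c) (p' ++ ['(']), 0) := by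
        intro c hc
        rw [bwd_append]
        rcases Nat.eq_zero_or_pos c with hc0 | hcpos
        · subst hc0
          have h0 := hinv 0 (Nat.zero_le _)
          simp only [List.drop_zero] at h0
          have hd : dotAll (p'.length :: st) (p' ++ ['(']) = dotAll st p' ++ ['.'] := by
            simp only [dotAll, List.foldl]
            rw [show (p' ++ ['(']).set p'.length '.' = p' ++ ['.'] from set_snoc p' '(' '.' []]
            exact dotAll_append st p' ['.'] hb
          simp [show bwd ['('] 0 = (['.'], 0) from by decide, h0, hd]
        · have hc1 : c - 1 ≤ st.length := by simp at hc; omega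
          have h1' := hinv (c - 1) hc1
          have hdrop : (p'.length :: st).drop c = st.drop (c - 1) := by
            cases c with
            | zero => omega
            | succ n => simp
          have hdd : dotAll (st.drop (c - 1)) (p' ++ ['(']) = dotAll (st.drop (c - 1)) p' ++ ['('] :=
            dotAll_append _ _ _ (fun q hq => hb q (List.mem_of_mem_drop hq))
          simp [show bwd ['('] c = (['('], c - 1) from by simp [bwd, hcpos], h1', hdrop, hdd]
      have this1 := ih (p' ++ ['(']) (p'.length :: st) hb' hinv'
      rw [hgo]
      have hfwd : fwd1 ('(' :: r) st.length = '(' :: fwd1 r (st.length + 1) := by simp [fwd1]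
      refine ⟨?_, ?_, ?_⟩
      · rw [this1.1]; simp [hfwd]
      · intro q hq; have h := this1.2.1 q hq; simp at h ⊢; omega
      · intro c hc
        have h := this1.2.2 c (by simpa using hc)
        simpa [hfwd] using h
    · by_cases h2 : ch = ')'
      · subst h2
        cases st with
        | nil =>
          -- unmatched ')': dotted in place; new prefix p' ++ ['.'], stack []
          have hset : (p' ++ ')' :: r).set p'.length '.' = (p' ++ ['.']) ++ r := by
            rw [set_snoc]; simp
          have hgo : goA (')' :: r) p'.length [] (p' ++ ')' :: r)
              = goA r (p' ++ ['.']).length [] ((p' ++ ['.']) ++ r) := by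
            simp [goA, hset]
          have hinv' : ∀ c ≤ ([] : List Nat).length,
              bwd (p' ++ ['.']) c = (dotAll (([] : List Nat).drop c) (p' ++ ['.']), 0) := by
            intro c hc
            simp only [List.length_nil, Nat.le_zero] at hc; subst hc
            rw [bwd_append]
            have h0 := hinv 0 (Nat.zero_le _)
            simp only [List.drop_nil] at h0 ⊢
            simp [show bwd ['.'] 0 = (['.'], 0) from by decide, h0, dotAll]
          have this1 := ih (p' ++ ['.']) [] (by simp) hinv'
          rw [hgo]
          have hfwd : fwd1 (')' :: r) 0 = '.' :: fwd1 r 0 := by simp [fwd1]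
          refine ⟨?_, ?_, ?_⟩
          · rw [this1.1]; simp [hfwd]
          · intro q hq; have h := this1.2.1 q hq; simp at h ⊢; omega
          · intro c hc
            have h := this1.2.2 c (by simpa using hc)
            simpa [hfwd] using h
        | cons t rest =>
          -- matched ')': pop the stack; new prefix p' ++ [')'], stack rest
          have hgo : goA (')' :: r) p'.length (t :: rest) (p' ++ ')' :: r)
              = goA r (p' ++ [')']).length rest ((p' ++ [')']) ++ r) := by
            simp [goA]
          have hb' : ∀ q ∈ rest, q < (p' ++ [')']).length := by
            intro q hq; have := hb q (by simp [hq]); simp; omega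
          have hinv' : ∀ c ≤ rest.length,
              bwd (p' ++ [')']) c = (dotAll (rest.drop c) (p' ++ [')']), 0) := by
            intro c hc
            rw [bwd_append]
            have h1' := hinv (c + 1) (by simp; omega)
            have hdrop : (t :: rest).drop (c + 1) = rest.drop c := by simp
            rw [hdrop] at h1'
            have hdd : dotAll (rest.drop c) (p' ++ [')']) = dotAll (rest.drop c) p' ++ [')'] :=
              dotAll_append _ _ _ (fun q hq =>
                hb q (by simp [List.mem_of_mem_drop hq]))
            simp [show bwd [')'] c = ([')'], c + 1) from by simp [bwd], h1', hdd]
          have this1 := ih (p' ++ [')']) rest hb' hinv'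
          rw [hgo]
          have hfwd : fwd1 (')' :: r) (t :: rest).length = ')' :: fwd1 r rest.length := by
            simp [fwd1]
          refine ⟨?_, ?_, ?_⟩
          · rw [this1.1]; simp [fwd1]
          · intro q hq; have h := this1.2.1 q hq; simp at h ⊢; omega
          · intro c hc
            have h := this1.2.2 c (by simpa using hc)
            simpa [fwd1] using h
      · -- any other character: copied through by both passes
        have hgo : goA (ch :: r) p'.length st (p' ++ ch :: r)
            = goA r (p' ++ [ch]).length st ((p' ++ [ch]) ++ r) := by
          simp [goA, h1, h2]
        have hb' : ∀ q ∈ st, q < (p' ++ [ch]).length := by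
          intro q hq; have := hb q hq; simp; omega
        have hinv' : ∀ c ≤ st.length,
            bwd (p' ++ [ch]) c = (dotAll (st.drop c) (p' ++ [ch]), 0) := by
          intro c hc
          rw [bwd_append]
          have h1' := hinv c hc
          have hdd : dotAll (st.drop c) (p' ++ [ch]) = dotAll (st.drop c) p' ++ [ch] :=
            dotAll_append _ _ _ (fun q hq => hb q (List.mem_of_mem_drop hq))
          simp [show bwd [ch] c = ([ch], c) from by simp [bwd, h1, h2], h1', hdd]
        have this1 := ih (p' ++ [ch]) st hb' hinv'
        rw [hgo]
        have hfwd : fwd1 (ch :: r) st.length = ch :: fwd1 r st.length := by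
          simp [fwd1, h1, h2]
        refine ⟨?_, ?_, ?_⟩
        · rw [this1.1]; simp [hfwd]
        · intro q hq; have h := this1.2.1 q hq; simp at h ⊢; omega
        · intro c hc
          have h := this1.2.2 c (by simpa using hc)
          simpa [hfwd] using h

-- ===== VERDICT (by name: the statement is the Claim_ definition above) =====
theorem fix_par_spec : Claim_equal_fix_par := by
  intro s _
  unfold Spec_fix_par
  have h := main_inv s.toList [] []
    (by intro q hq; simp at hq)
    (by intro c hc; simp only [List.length_nil, Nat.le_zero] at hc; subst hc
        simp [bwd, dotAll])
  simp only [List.length_nil, List.nil_append] at h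
  obtain ⟨h1, _, h3⟩ := h
  have hb := h3 0 (Nat.zero_le _)
  simp only [List.drop_zero] at hb
  have hA : fix_par s
      = String.ofList (dotAll (goA s.toList 0 [] s.toList).1 (goA s.toList 0 [] s.toList).2) := rfl
  have hB : fix_par_alt s = String.ofList (bwd (fwd1 s.toList 0) 0).1 := rfl
  rw [hA, hB, hb, h1]
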